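-- pv_equiv track=rewrite | github.com/minstrel1149/exercise_book_ver2 | Machine_learning/dl_bootcamp_pytorch/chapter18_CNN_3/mnist_classifier/utils.py | get_hidden_sizes
-- ===== SOURCE A (Python) =====
-- def get_hidden_sizes(input_size, output_size, n_layers):
--     step_size = int((input_size - output_size) / n_layers)
--
--     hidden_sizes = []
--     current_size = input_size
--     for _ in range(n_layers - 1):
--         hidden_sizes.append(current_size - step_size)
--         current_size = hidden_sizes[-1]
--
--     return hidden_sizes
-- ===== SOURCE B (Python) =====
-- def get_hidden_sizes(input_size, output_size, n_layers):
--     step_size = int((input_size - output_size) / n_layers)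
--     return [input_size - step_size * i for i in range(1, n_layers)]
-- ===== Notes on version B (the rewrite author's own statement) =====
-- stated objective: simpler
-- what changed: Replaces the running-accumulator loop (each element computed from the previous one) by a closed-form comprehension where each element is a direct function of its index: input_size - step_size*i.
import Mathlib
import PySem

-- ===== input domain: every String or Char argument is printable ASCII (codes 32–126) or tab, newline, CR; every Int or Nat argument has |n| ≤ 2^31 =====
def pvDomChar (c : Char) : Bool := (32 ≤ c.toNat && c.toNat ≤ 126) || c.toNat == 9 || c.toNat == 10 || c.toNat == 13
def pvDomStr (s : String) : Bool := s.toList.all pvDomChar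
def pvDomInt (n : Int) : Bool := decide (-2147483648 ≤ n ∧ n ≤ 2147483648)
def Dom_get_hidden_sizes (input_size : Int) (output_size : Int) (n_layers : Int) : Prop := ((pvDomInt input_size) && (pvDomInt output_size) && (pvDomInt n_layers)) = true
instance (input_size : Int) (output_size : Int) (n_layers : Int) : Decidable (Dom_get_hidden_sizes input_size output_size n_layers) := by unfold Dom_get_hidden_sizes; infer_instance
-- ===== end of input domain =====

-- B computes each hidden size directly from its index (closed form) instead of A's
-- running accumulator; same values, same cost (objective: simpler).
-- Note: Python's int((a-b)/n) (float division then truncation) equals exact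
-- truncated integer division Int.tdiv on the whole Dom (|ints| ≤ 2^31, so the
-- numerator ≤ 2^32 < 2^53 and the float quotient cannot cross an integer).

-- ===== PORT A =====
-- the for-loop: m iterations left, current_size, accumulated hidden_sizes
def pvLoopA (step : Int) : Nat → Int → List Int → List Int
  | 0, _, acc => acc
  | m+1, cur, acc => pvLoopA step m (cur - step) (acc ++ [cur - step])

def get_hidden_sizes (input_size : Int) (output_size : Int) (n_layers : Int) : List Int :=
  let step_size := Int.tdiv (input_size - output_size) n_layers
  pvLoopA step_size (n_layers - 1).toNat input_size []

-- ===== PORT B =====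
def get_hidden_sizes_alt (input_size : Int) (output_size : Int) (n_layers : Int) : List Int :=
  let step_size := Int.tdiv (input_size - output_size) n_layers
  (PySem.List.pyRange 1 n_layers 1).map (fun i => input_size - step_size * i)

-- ===== PRECONDITION & SPEC =====
-- Pre_ excludes n_layers = 0, where A raises ZeroDivisionError.
def Pre_get_hidden_sizes (input_size : Int) (output_size : Int) (n_layers : Int) : Prop := n_layers ≠ 0
instance (input_size : Int) (output_size : Int) (n_layers : Int) : Decidable (Pre_get_hidden_sizes input_size output_size n_layers) := by unfold Pre_get_hidden_sizes; infer_instance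
def pvWitness_get_hidden_sizes : Int × Int × Int := (100, 10, 3)

def Spec_get_hidden_sizes (input_size : Int) (output_size : Int) (n_layers : Int) (out : List Int) : Prop := out = get_hidden_sizes_alt input_size output_size n_layers
instance (input_size : Int) (output_size : Int) (n_layers : Int) (out : List Int) : Decidable (Spec_get_hidden_sizes input_size output_size n_layers out) := by unfold Spec_get_hidden_sizes; infer_instance

-- ===== CLAIM (what is proved, stated in full; the proofs are below) =====
def Claim_equal_get_hidden_sizes : Prop := ∀ (input_size : Int) (output_size : Int) (n_layers : Int), Dom_get_hidden_sizes input_size output_size n_layers → Pre_get_hidden_sizes input_size output_size n_layers → Spec_get_hidden_sizes input_size output_size n_layers (get_hidden_sizes input_size output_size n_layers)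

-- ===== LEMMAS AND PROOFS =====
theorem pvLoopA_closed (step : Int) (m : Nat) (cur : Int) (acc : List Int) :
    pvLoopA step m cur acc = acc ++ (List.range m).map (fun (j : Nat) => cur - step * ((j : Int) + 1)) := by
  induction m generalizing cur acc with
  | zero => simp [pvLoopA]
  | succ m ih =>
    rw [pvLoopA, ih, List.range_succ_eq_map, List.map_cons, List.map_map, List.append_assoc,
      List.singleton_append]
    congr 1
    congr 1
    · push_cast; ring
    · apply List.map_congr_left
      intro j _
      simp only [Function.comp]
      push_cast
      ring

-- ===== VERDICT (by name: the statement is the Claim_ definition above) =====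
theorem get_hidden_sizes_spec : Claim_equal_get_hidden_sizes := by
  intro i o n _ _
  show get_hidden_sizes i o n = get_hidden_sizes_alt i o n
  unfold get_hidden_sizes get_hidden_sizes_alt
  rw [pvLoopA_closed, PySem.List.pyRange_one, List.map_map, List.nil_append]
  apply List.map_congr_left
  intro j _
  simp only [Function.comp]
  ring
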